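-- pv_equiv track=rewrite | github.com/BehrozRazaq/AoC2024 | 4/2.py | in_bounds
-- ===== SOURCE A (Python) =====
-- def in_bounds(grid, r, c):
--     dirs = [(-1, 0), (0, -1), (0, 1), (1, 0)]
--     potentials = []
--     for r_off, c_off in dirs:
--         pot_r, pot_c = r + r_off, c + c_off
--         if pot_r >= 0 and pot_r < len(grid) and pot_c >= 0 and pot_c < len(grid):
--             potentials.append(True)
--         else:
--             potentials.append(False)
--
--     return all(potentials)
-- ===== SOURCE B (Python) =====
-- def in_bounds(grid, r, c):
--     n = len(grid)
--     # Note: like the original, the column is bounded by len(grid), not len(grid[0]).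
--     return 1 <= r < n - 1 and 1 <= c < n - 1
-- ===== Notes on version B (the rewrite author's own statement) =====
-- stated objective: simpler
-- what changed: Replaced the 4-direction loop that builds a boolean list and all() over it with one closed-form comparison 1 <= r,c < len(grid)-1 (keeping the original's column bound of len(grid)).
import Mathlib
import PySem

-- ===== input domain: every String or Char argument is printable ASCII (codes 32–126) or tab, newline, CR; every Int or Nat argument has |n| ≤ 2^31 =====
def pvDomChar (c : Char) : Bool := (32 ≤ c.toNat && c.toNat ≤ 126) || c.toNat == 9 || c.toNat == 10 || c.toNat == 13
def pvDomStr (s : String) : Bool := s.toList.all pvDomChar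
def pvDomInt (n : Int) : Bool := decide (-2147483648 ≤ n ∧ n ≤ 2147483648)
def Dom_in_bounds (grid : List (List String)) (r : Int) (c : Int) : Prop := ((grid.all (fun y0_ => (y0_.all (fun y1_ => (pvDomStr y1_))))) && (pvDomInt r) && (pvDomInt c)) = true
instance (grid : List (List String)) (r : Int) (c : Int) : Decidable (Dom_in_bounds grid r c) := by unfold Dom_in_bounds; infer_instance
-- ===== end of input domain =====

-- B replaces A's 4-direction loop + all() with one closed-form range comparison
-- (keeping A's column bound of len(grid)); objective: simpler.

-- ===== PORT A =====
def in_bounds (grid : List (List String)) (r : Int) (c : Int) : Bool :=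
  let dirs : List (Int × Int) := [(-1, 0), (0, -1), (0, 1), (1, 0)]
  let potentials : List Bool := dirs.foldl (fun acc off =>
    let pot_r := r + off.1
    let pot_c := c + off.2
    if pot_r ≥ 0 ∧ pot_r < (grid.length : Int) ∧ pot_c ≥ 0 ∧ pot_c < (grid.length : Int) then
      acc ++ [true]
    else
      acc ++ [false]) []
  potentials.all id

-- ===== PORT B =====
def in_bounds_alt (grid : List (List String)) (r : Int) (c : Int) : Bool :=
  let n : Int := grid.length
  -- Note: like A, the column is bounded by len(grid), not len(grid[0]).
  decide (1 ≤ r ∧ r < n - 1 ∧ 1 ≤ c ∧ c < n - 1)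

-- ===== PRECONDITION & SPEC =====
def Spec_in_bounds (grid : List (List String)) (r : Int) (c : Int) (out : Bool) : Prop := out = in_bounds_alt grid r c
instance (grid : List (List String)) (r : Int) (c : Int) (out : Bool) : Decidable (Spec_in_bounds grid r c out) := by unfold Spec_in_bounds; infer_instance

-- ===== CLAIM (what is proved, stated in full; the proofs are below) =====
def Claim_equal_in_bounds : Prop := ∀ (grid : List (List String)) (r : Int) (c : Int), Dom_in_bounds grid r c → Spec_in_bounds grid r c (in_bounds grid r c)

-- ===== LEMMAS AND PROOFS =====

-- ===== VERDICT (by name: the statement is the Claim_ definition above) =====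
theorem in_bounds_spec : Claim_equal_in_bounds := by
  intro grid r c _
  unfold Spec_in_bounds in_bounds in_bounds_alt
  have key : ∀ (acc : List Bool) (p : Prop) [Decidable p],
      (if p then acc ++ [true] else acc ++ [false]) = acc ++ [decide p] := by
    intro acc p _; by_cases h : p <;> simp [h]
  simp only [List.foldl]
  simp only [key]
  simp only [List.nil_append, List.cons_append, List.all_cons, List.all_nil, id, Bool.and_true]
  simp only [← Bool.decide_and, decide_eq_decide]
  omega
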